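-- pv_equiv track=rewrite | github.com/omniscale/imposm2 | imposm/cache/nodes.py | unzip_nodes
-- ===== SOURCE A (Python) =====
-- def unzip_nodes(nodes):
--     ids, lons, lats = [], [], []
--     last_id = last_lon = last_lat = 0
--     for id, lon, lat in nodes:
--         ids.append(id - last_id)
--         lons.append(lon - last_lon)
--         lats.append(lat - last_lat)
--         last_id = id
--         last_lon = lon
--         last_lat = lat
--
--     return ids, lons, lats
-- ===== SOURCE B (Python) =====
-- def unzip_nodes(nodes):
--     if not nodes:
--         return [], [], []
--     ids, lons, lats = zip(*nodes)
--     delta = lambda col: [b - a for a, b in zip((0,) + col[:-1], col)]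
--     return delta(ids), delta(lons), delta(lats)
-- ===== Notes on version B (the rewrite author's own statement) =====
-- stated objective: alternative
-- what changed: Replaces A's single interleaved row pass with six accumulators by a transpose (zip(*nodes)) followed by three independent column-wise delta encodings via zip of each column with its shifted self.
import Mathlib
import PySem

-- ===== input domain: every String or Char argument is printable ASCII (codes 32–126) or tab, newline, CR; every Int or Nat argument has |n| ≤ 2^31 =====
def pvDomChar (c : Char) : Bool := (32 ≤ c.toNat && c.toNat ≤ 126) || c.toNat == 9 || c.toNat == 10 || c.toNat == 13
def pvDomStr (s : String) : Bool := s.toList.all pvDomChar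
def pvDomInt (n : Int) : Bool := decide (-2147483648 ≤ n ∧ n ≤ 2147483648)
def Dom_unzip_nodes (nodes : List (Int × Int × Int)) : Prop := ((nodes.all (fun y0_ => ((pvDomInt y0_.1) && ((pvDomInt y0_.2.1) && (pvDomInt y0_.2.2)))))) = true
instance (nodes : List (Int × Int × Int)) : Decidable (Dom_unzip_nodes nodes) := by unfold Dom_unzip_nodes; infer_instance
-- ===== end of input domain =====

-- B replaces A's single interleaved row pass (six running accumulators) by a transpose
-- plus three independent column-wise delta encodings (objective: alternative decomposition).

-- ===== PORT A =====
-- fold state: (ids, lons, lats, last_id, last_lon, last_lat), appending per row as A does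
def unzip_nodes (nodes : List (Int × Int × Int)) : List Int × List Int × List Int :=
  let st := nodes.foldl
    (fun (acc : List Int × List Int × List Int × Int × Int × Int) n =>
      let (ids, lons, lats, lastId, lastLon, lastLat) := acc
      let (id, lon, lat) := n
      (ids ++ [id - lastId], lons ++ [lon - lastLon], lats ++ [lat - lastLat], id, lon, lat))
    ([], [], [], 0, 0, 0)
  (st.1, st.2.1, st.2.2.1)

-- ===== PORT B =====
-- delta(col) = [b - a for a, b in zip((0,) + col[:-1], col)]
def pvDelta (col : List Int) : List Int :=
  (List.zip (0 :: col.dropLast) col).map (fun p => p.2 - p.1)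

def unzip_nodes_alt (nodes : List (Int × Int × Int)) : List Int × List Int × List Int :=
  if nodes = [] then ([], [], [])
  else
    -- ids, lons, lats = zip(*nodes)
    let ids := nodes.map (fun n => n.1)
    let lons := nodes.map (fun n => n.2.1)
    let lats := nodes.map (fun n => n.2.2)
    (pvDelta ids, pvDelta lons, pvDelta lats)

-- ===== PRECONDITION & SPEC =====
def Spec_unzip_nodes (nodes : List (Int × Int × Int)) (out : List Int × List Int × List Int) : Prop := out = unzip_nodes_alt nodes
instance (nodes : List (Int × Int × Int)) (out : List Int × List Int × List Int) : Decidable (Spec_unzip_nodes nodes out) := by unfold Spec_unzip_nodes; infer_instance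

-- ===== CLAIM (what is proved, stated in full; the proofs are below) =====
def Claim_equal_unzip_nodes : Prop := ∀ (nodes : List (Int × Int × Int)), Dom_unzip_nodes nodes → Spec_unzip_nodes nodes (unzip_nodes nodes)

-- ===== LEMMAS AND PROOFS =====

-- delta encoding of a column starting from baseline p, as structural recursion
def pvDeltaFrom (p : Int) : List Int → List Int
  | [] => []
  | x :: xs => (x - p) :: pvDeltaFrom x xs

theorem pvDelta_eq_deltaFrom (p : Int) (col : List Int) :
    (List.zip (p :: col.dropLast) col).map (fun q => q.2 - q.1) = pvDeltaFrom p col := by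
  induction col generalizing p with
  | nil => rfl
  | cons x xs ih =>
    cases xs with
    | nil => rfl
    | cons y ys =>
      have h := ih x
      simp only [List.zip, pvDeltaFrom, List.dropLast, List.zipWith_cons_cons, List.map_cons,
        List.map_zipWith, List.cons.injEq, true_and] at h ⊢
      exact h

theorem unzip_nodes_foldl (nodes : List (Int × Int × Int))
    (ids lons lats : List Int) (lid llon llat : Int) :
    nodes.foldl
      (fun (acc : List Int × List Int × List Int × Int × Int × Int) n =>
        let (ids, lons, lats, lastId, lastLon, lastLat) := acc
        let (id, lon, lat) := n
        (ids ++ [id - lastId], lons ++ [lon - lastLon], lats ++ [lat - lastLat], id, lon, lat))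
      (ids, lons, lats, lid, llon, llat)
    = (ids ++ pvDeltaFrom lid (nodes.map (fun n => n.1)),
       lons ++ pvDeltaFrom llon (nodes.map (fun n => n.2.1)),
       lats ++ pvDeltaFrom llat (nodes.map (fun n => n.2.2)),
       (nodes.foldl (fun _ n => n) (lid, llon, llat) : Int × Int × Int)) := by
  induction nodes generalizing ids lons lats lid llon llat with
  | nil => simp [pvDeltaFrom]
  | cons n ns ih =>
    obtain ⟨id, lon, lat⟩ := n
    simp only [List.foldl, List.map, pvDeltaFrom]
    rw [ih]
    simp

-- ===== VERDICT (by name: the statement is the Claim_ definition above) =====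
theorem unzip_nodes_spec : Claim_equal_unzip_nodes := by
  intro nodes _
  show unzip_nodes nodes = unzip_nodes_alt nodes
  unfold unzip_nodes unzip_nodes_alt pvDelta
  rw [unzip_nodes_foldl]
  rcases nodes with _ | ⟨n, ns⟩
  · simp [pvDeltaFrom]
  · simp only [if_neg (List.cons_ne_nil n ns)]
    rw [pvDelta_eq_deltaFrom, pvDelta_eq_deltaFrom, pvDelta_eq_deltaFrom]
    simp
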